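-- pv_equiv track=rewrite | github.com/IgrMd/yandex-algos-training | Тренировки по алгоритмам 1.0/Лекция 5. «Префиксные суммы и два указателя»/D.py | monuments_count
-- ===== SOURCE A (Python) =====
-- def monuments_count(n, r, monuments):
--     count = 0
--     right = 0
--     for left in range(n):
--         while right < n and monuments[right] - monuments[left] <= r:
--             right += 1
--         if right < n:
--             count += n - right
--     return count
-- ===== SOURCE B (Python) =====
-- def _bisect_right(a, x, lo, hi):
--     while lo < hi:
--         mid = (lo + hi) // 2
--         if x < a[mid]:
--             hi = mid
--         else:
--             lo = mid + 1
--     return lo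
--
--
-- def monuments_count(n, r, monuments):
--     count = 0
--     for left in range(n):
--         j = _bisect_right(monuments, monuments[left] + r, 0, n)
--         count += n - j
--     return count
-- ===== Notes on version B (the rewrite author's own statement) =====
-- stated objective: alternative
-- what changed: Replaces the shared monotone right pointer with an independent binary search per left index (a hand-written bisect_right over [0, n)), accumulating n - j directly.
-- outside the precondition, e.g. on monuments_count(3, 0, [0, 5, 1]): A returns 2, B returns 4
import Mathlib
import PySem

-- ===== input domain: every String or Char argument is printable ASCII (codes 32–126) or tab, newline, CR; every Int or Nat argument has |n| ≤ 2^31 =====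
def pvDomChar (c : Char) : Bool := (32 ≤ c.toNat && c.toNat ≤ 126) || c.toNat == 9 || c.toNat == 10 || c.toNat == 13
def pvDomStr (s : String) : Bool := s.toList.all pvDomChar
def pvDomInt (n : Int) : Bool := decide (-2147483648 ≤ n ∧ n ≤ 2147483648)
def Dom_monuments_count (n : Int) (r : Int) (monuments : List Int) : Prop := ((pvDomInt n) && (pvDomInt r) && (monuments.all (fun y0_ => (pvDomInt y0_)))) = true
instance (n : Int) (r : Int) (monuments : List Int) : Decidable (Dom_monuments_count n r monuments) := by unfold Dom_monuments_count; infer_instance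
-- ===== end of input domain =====

-- B replaces A's shared monotone right pointer by an independent binary search per left
-- index (alternative algorithm, not claimed faster); equivalence is about the return value.

-- ===== PORT A =====
-- the inner 'while right < n and monuments[right] - monuments[left] <= r'.
-- pyGetD's default 0 is only reachable outside Pre_ (there Python raises IndexError).
def aWhile (n : Int) (r : Int) (monuments : List Int) (left : Int) (right : Int) : Int :=
  if _h : right < n ∧ PySem.List.pyGetD monuments right 0 - PySem.List.pyGetD monuments left 0 ≤ r then
    aWhile n r monuments left (right + 1)
  else right
termination_by (n - right).toNat
decreasing_by omega

def monuments_count (n : Int) (r : Int) (monuments : List Int) : Int :=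
  ((PySem.List.pyRange 0 n 1).foldl
    (fun s left =>
      let right := aWhile n r monuments left s.2
      (if right < n then s.1 + (n - right) else s.1, right))
    ((0 : Int), (0 : Int))).1

-- ===== PORT B =====
-- B's hand-written bisect_right loop (Source B's _bisect_right), transcribed as recursion on hi - lo
def bBisectRight (a : List Int) (x : Int) (lo : Int) (hi : Int) : Int :=
  if _h : lo < hi then
    let mid := PySem.Int.floordiv (lo + hi) 2
    if x < PySem.List.pyGetD a mid 0 then bBisectRight a x lo mid
    else bBisectRight a x (mid + 1) hi
  else lo
termination_by (hi - lo).toNat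
decreasing_by
  all_goals
    have hm : PySem.Int.floordiv (lo + hi) 2 = (lo + hi) / 2 :=
      PySem.Int.floordiv_eq_ediv_of_pos (by omega)
    omega

def monuments_count_alt (n : Int) (r : Int) (monuments : List Int) : Int :=
  (PySem.List.pyRange 0 n 1).foldl
    (fun count left =>
      let j := bBisectRight monuments (PySem.List.pyGetD monuments left 0 + r) 0 n
      count + (n - j))
    0

-- ===== PRECONDITION & SPEC =====
-- Pre_ excludes (a) n > len(monuments), where A raises IndexError, and (b) inputs whose
-- first n monuments are not sorted nondecreasingly, on which A's shared-right-pointer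
-- value is an accident of its implementation (the two-pointer scheme is only meaningful
-- on sorted input) and B's per-left binary-search value is equally defensible.
def Pre_monuments_count (n : Int) (r : Int) (monuments : List Int) : Prop :=
  n ≤ monuments.length ∧ List.Pairwise (· ≤ ·) (monuments.take n.toNat)
instance (n : Int) (r : Int) (monuments : List Int) : Decidable (Pre_monuments_count n r monuments) := by unfold Pre_monuments_count; infer_instance

def pvWitness_monuments_count : Int × Int × List Int := (3, 1, [0, 1, 5])

def Spec_monuments_count (n : Int) (r : Int) (monuments : List Int) (out : Int) : Prop := out = monuments_count_alt n r monuments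
instance (n : Int) (r : Int) (monuments : List Int) (out : Int) : Decidable (Spec_monuments_count n r monuments out) := by unfold Spec_monuments_count; infer_instance

-- ===== CLAIM (what is proved, stated in full; the proofs are below) =====
def Claim_equal_monuments_count : Prop := ∀ (n : Int) (r : Int) (monuments : List Int), Dom_monuments_count n r monuments → Pre_monuments_count n r monuments → Spec_monuments_count n r monuments (monuments_count n r monuments)

-- ===== LEMMAS AND PROOFS =====

-- one-step unfolding lemmas for the two recursive loops
theorem aWhile_eq (n r : Int) (m : List Int) (left right : Int) :
    aWhile n r m left right =
      if right < n ∧ PySem.List.pyGetD m right 0 - PySem.List.pyGetD m left 0 ≤ r then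
        aWhile n r m left (right + 1)
      else right := by
  rw [aWhile]; split <;> rfl

theorem bBisectRight_eq (a : List Int) (x lo hi : Int) :
    bBisectRight a x lo hi =
      if lo < hi then
        if x < PySem.List.pyGetD a (PySem.Int.floordiv (lo + hi) 2) 0 then
          bBisectRight a x lo (PySem.Int.floordiv (lo + hi) 2)
        else bBisectRight a x (PySem.Int.floordiv (lo + hi) 2 + 1) hi
      else lo := by
  rw [bBisectRight]; split <;> rfl

-- sortedness of the first n elements, phrased on pyGetD values
theorem pv_sorted_getD (n : Int) (monuments : List Int)
    (hlen : n ≤ monuments.length)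
    (hsor : List.Pairwise (· ≤ ·) (monuments.take n.toNat)) :
    ∀ i j : Int, 0 ≤ i → i ≤ j → j < n →
      PySem.List.pyGetD monuments i 0 ≤ PySem.List.pyGetD monuments j 0 := by
  intro i j hi hij hjn
  have hjl : j < (monuments.length : Int) := lt_of_lt_of_le hjn hlen
  have hiL : i.toNat < monuments.length := by omega
  have hjL : j.toNat < monuments.length := by omega
  rw [PySem.List.pyGetD_eq_getElem monuments 0 hi (by omega),
      PySem.List.pyGetD_eq_getElem monuments 0 (by omega) (by omega)]
  rcases eq_or_lt_of_le hij with h | h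
  · simp [h]
  · have hchar := (List.pairwise_iff_getElem).1 hsor i.toNat j.toNat
      (by simp [List.length_take]; omega) (by simp [List.length_take]; omega) (by omega)
    simpa [List.getElem_take] using hchar

-- the while loop of A: characterisation of the returned pointer
theorem pv_aWhile_spec (n r : Int) (m : List Int) (left : Int) :
    ∀ fuel : Nat, ∀ right : Int, (n - right).toNat ≤ fuel → 0 ≤ right → right ≤ n →
      right ≤ aWhile n r m left right ∧
      aWhile n r m left right ≤ n ∧
      (∀ j, right ≤ j → j < aWhile n r m left right →
        PySem.List.pyGetD m j 0 - PySem.List.pyGetD m left 0 ≤ r) ∧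
      (aWhile n r m left right < n →
        r < PySem.List.pyGetD m (aWhile n r m left right) 0 - PySem.List.pyGetD m left 0) := by
  intro fuel
  induction fuel with
  | zero =>
    intro right hf h0 hn
    have hr : right = n := by omega
    rw [aWhile_eq, if_neg (by omega)]
    exact ⟨le_rfl, hn, fun j h1 h2 => absurd h2 (by omega), fun h => absurd h (by omega)⟩
  | succ k ih =>
    intro right hf h0 hn
    by_cases hc : right < n ∧ PySem.List.pyGetD m right 0 - PySem.List.pyGetD m left 0 ≤ r
    · rw [aWhile_eq, if_pos hc]
      obtain ⟨h1, h2, h3, h4⟩ := ih (right + 1) (by omega) (by omega) (by omega)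
      refine ⟨by omega, h2, ?_, h4⟩
      intro j hj1 hj2
      rcases eq_or_lt_of_le hj1 with h | h
      · rw [← h]; exact hc.2
      · exact h3 j (by omega) hj2
    · rw [aWhile_eq, if_neg hc]
      refine ⟨le_rfl, hn, fun j hj1 hj2 => absurd hj2 (by omega), fun hlt => ?_⟩
      by_contra hx
      exact hc ⟨hlt, by omega⟩

-- the bisect loop of B: standard binary-search invariant (needs sortedness)
theorem pv_bisect_spec (n : Int) (m : List Int) (x : Int)
    (hsort : ∀ i j : Int, 0 ≤ i → i ≤ j → j < n →
      PySem.List.pyGetD m i 0 ≤ PySem.List.pyGetD m j 0) :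
    ∀ fuel : Nat, ∀ lo hi : Int, (hi - lo).toNat ≤ fuel →
      0 ≤ lo → lo ≤ hi → hi ≤ n →
      (∀ j, 0 ≤ j → j < lo → PySem.List.pyGetD m j 0 ≤ x) →
      (∀ j, hi ≤ j → j < n → x < PySem.List.pyGetD m j 0) →
      0 ≤ bBisectRight m x lo hi ∧
      bBisectRight m x lo hi ≤ n ∧
      (∀ j, 0 ≤ j → j < bBisectRight m x lo hi → PySem.List.pyGetD m j 0 ≤ x) ∧
      (∀ j, bBisectRight m x lo hi ≤ j → j < n → x < PySem.List.pyGetD m j 0) := by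
  intro fuel
  induction fuel with
  | zero =>
    intro lo hi hf h0 hlh hhn hlow hup
    have : lo = hi := by omega
    rw [bBisectRight_eq, if_neg (by omega)]
    exact ⟨h0, by omega, hlow, fun j hj1 hj2 => hup j (by omega) hj2⟩
  | succ k ih =>
    intro lo hi hf h0 hlh hhn hlow hup
    by_cases hlt : lo < hi
    · rw [bBisectRight_eq, if_pos hlt]
      have hmid : PySem.Int.floordiv (lo + hi) 2 = (lo + hi) / 2 :=
        PySem.Int.floordiv_eq_ediv_of_pos (by omega)
      have hm1 : lo ≤ PySem.Int.floordiv (lo + hi) 2 := by omega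
      have hm2 : PySem.Int.floordiv (lo + hi) 2 < hi := by omega
      by_cases hx : x < PySem.List.pyGetD m (PySem.Int.floordiv (lo + hi) 2) 0
      · rw [if_pos hx]
        refine ih lo (PySem.Int.floordiv (lo + hi) 2) (by omega) h0 hm1 (by omega) hlow ?_
        intro j hj1 hj2
        exact lt_of_lt_of_le hx (hsort (PySem.Int.floordiv (lo + hi) 2) j (by omega) hj1 hj2)
      · rw [if_neg hx]
        refine ih (PySem.Int.floordiv (lo + hi) 2 + 1) hi (by omega) (by omega) (by omega) hhn ?_ hup
        intro j hj1 hj2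
        rcases lt_or_ge j lo with h | h
        · exact hlow j hj1 h
        · exact le_trans (hsort j (PySem.Int.floordiv (lo + hi) 2) hj1 (by omega) (by omega)) (by omega)
    · rw [bBisectRight_eq, if_neg hlt]
      exact ⟨h0, by omega, hlow, fun j hj1 hj2 => hup j (by omega) hj2⟩

-- main outer-loop invariant: the pair-fold of A and the count-fold of B agree
theorem pv_main (n r : Int) (m : List Int)
    (hsort : ∀ i j : Int, 0 ≤ i → i ≤ j → j < n →
      PySem.List.pyGetD m i 0 ≤ PySem.List.pyGetD m j 0) :
    ∀ fuel : Nat, ∀ a count right : Int, (n - a).toNat ≤ fuel → 0 ≤ a →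
      (a < n → 0 ≤ right ∧ right ≤ n) →
      (∀ j, 0 ≤ j → j < right → a < n →
        PySem.List.pyGetD m j 0 ≤ PySem.List.pyGetD m a 0 + r) →
      ((PySem.List.pyRange a n 1).foldl
        (fun s left =>
          let right := aWhile n r m left s.2
          (if right < n then s.1 + (n - right) else s.1, right))
        (count, right)).1 =
      (PySem.List.pyRange a n 1).foldl
        (fun count left =>
          let j := bBisectRight m (PySem.List.pyGetD m left 0 + r) 0 n
          count + (n - j))
        count := by
  intro fuel
  induction fuel with
  | zero =>
    intro a count right hf h0a hr hinv
    rw [PySem.List.pyRange_one_eq_nil (by omega)]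
    rfl
  | succ k ih =>
    intro a count right hf h0a hr hinv
    by_cases han : a < n
    · rw [PySem.List.pyRange_one_cons han, List.foldl_cons, List.foldl_cons]
      obtain ⟨h0r, hrn⟩ := hr han
      obtain ⟨w1, w2, w3, w4⟩ :=
        pv_aWhile_spec n r m a (n - right).toNat right le_rfl h0r hrn
      obtain ⟨b1, b2, b3, b4⟩ :=
        pv_bisect_spec n m (PySem.List.pyGetD m a 0 + r) hsort n.toNat 0 n (by omega)
          le_rfl (by omega) le_rfl
          (fun j hj1 hj2 => absurd hj2 (by omega))
          (fun j hj1 hj2 => absurd hj2 (by omega))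
      set ρ := aWhile n r m a right with hρ
      set bj := bBisectRight m (PySem.List.pyGetD m a 0 + r) 0 n with hbj
      -- A's pointer has the full lower property on [0, ρ)
      have hfull : ∀ j, 0 ≤ j → j < ρ → PySem.List.pyGetD m j 0 ≤ PySem.List.pyGetD m a 0 + r := by
        intro j hj1 hj2
        rcases lt_or_ge j right with h | h
        · exact hinv j hj1 h han
        · have := w3 j h hj2; omega
      -- uniqueness: the two pointers coincide
      have heq : ρ = bj := by
        rcases lt_trichotomy ρ bj with h | h | h
        · have hρn : ρ < n := lt_of_lt_of_le h b2
          have h1 := w4 hρn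
          have h2 := b3 ρ (by omega) h
          omega
        · exact h
        · have hjn : bj < n := lt_of_lt_of_le h w2
          have h1 := b4 bj le_rfl hjn
          have h2 := hfull bj b1 h
          omega
      have hcount : (if ρ < n then count + (n - ρ) else count) = count + (n - bj) := by
        rcases lt_or_ge ρ n with h | h
        · rw [if_pos h]; omega
        · rw [if_neg (by omega)]; omega
      have hnext : ∀ j, 0 ≤ j → j < ρ → a + 1 < n →
          PySem.List.pyGetD m j 0 ≤ PySem.List.pyGetD m (a + 1) 0 + r := by
        intro j hj1 hj2 ha1
        have h1 := hfull j hj1 hj2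
        have h2 := hsort a (a + 1) h0a (by omega) ha1
        omega
      have := ih (a + 1) (count + (n - bj)) ρ (by omega) (by omega)
        (fun _ => ⟨by omega, w2⟩) hnext
      rw [heq] at hcount
      simpa [hcount, heq] using this
    · rw [PySem.List.pyRange_one_eq_nil (by omega)]
      rfl

-- ===== VERDICT (by name: the statement is the Claim_ definition above) =====
theorem monuments_count_spec : Claim_equal_monuments_count := by
  intro n r m _hdom hpre
  obtain ⟨hlen, hsor⟩ := hpre
  unfold Spec_monuments_count monuments_count monuments_count_alt
  exact pv_main n r m (pv_sorted_getD n m hlen hsor) n.toNat 0 0 0 (by omega) le_rfl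
    (fun h => ⟨le_rfl, le_of_lt h⟩) (fun j hj1 hj2 _ => absurd hj2 (by omega))
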